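-- pv_equiv track=rewrite | github.com/AlexanderBedrosyan/Programming-Fundamentals-with-Python | 02. Programming Fundamentals Final Exam/plant_discovery_1.py | update
-- ===== SOURCE A (Python) =====
-- def update(dict, plant, rarity):
--     for ch in dict:
--         if ch == plant:
--             new_list = []
--             for key in dict[ch]:
--                 new_list = dict[ch][key]
--                 dict[ch] = {}
--                 dict[ch][rarity] = new_list
--     return dict
-- ===== SOURCE B (Python) =====
-- def update(dict, plant, rarity):
--     if plant in dict:
--         inner = dict[plant]
--         if inner:
--             first_value = next(iter(inner.values()))
--             dict[plant] = {rarity: first_value}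
--     return dict
-- ===== Notes on version B (the rewrite author's own statement) =====
-- stated objective: simpler
-- what changed: Replaces A's loop over all outer keys and its inner key-loop that repeatedly rebuilds the matching inner dict with a single membership test, one lookup of the first inner value, and one direct construction {rarity: first_value}.
-- outside the precondition, e.g. on update({'a': {'x': [1], 'y': [2]}}, 'a', 'r'): A raises KeyError, B returns {'a': {'r': [1]}}
import Mathlib
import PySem

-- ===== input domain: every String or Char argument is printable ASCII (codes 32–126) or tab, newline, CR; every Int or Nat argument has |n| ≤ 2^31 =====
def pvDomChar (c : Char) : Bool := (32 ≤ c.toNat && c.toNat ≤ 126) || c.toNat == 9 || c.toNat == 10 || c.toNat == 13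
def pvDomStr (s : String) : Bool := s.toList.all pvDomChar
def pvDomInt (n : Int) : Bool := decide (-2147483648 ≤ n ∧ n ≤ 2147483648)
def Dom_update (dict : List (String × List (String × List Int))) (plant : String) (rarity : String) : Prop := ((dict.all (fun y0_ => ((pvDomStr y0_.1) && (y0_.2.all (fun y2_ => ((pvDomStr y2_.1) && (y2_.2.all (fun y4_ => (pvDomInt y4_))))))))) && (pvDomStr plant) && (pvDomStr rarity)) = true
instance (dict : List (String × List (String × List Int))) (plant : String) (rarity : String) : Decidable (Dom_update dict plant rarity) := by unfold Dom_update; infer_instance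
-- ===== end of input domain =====

-- B replaces A's outer key-loop and inner dict-rebuilding loop by one membership test, one lookup of
-- the first inner value and one direct insert {rarity: first_value} (objective: simpler). Both Pythons
-- mutate `dict` in place identically; the equivalence proved here is about the returned value.


-- ===== PORT A =====
def update (dict : List (String × List (String × List Int))) (plant : String) (rarity : String) : List (String × List (String × List Int)) :=
  -- the Python dict of dicts, as nested PySem.Dict
  let d0 : PySem.Dict String (PySem.Dict String (List Int)) :=
    PySem.Dict.mk (dict.map (fun p => (p.1, PySem.Dict.mk p.2)))
  -- for ch in dict:
  let d := (PySem.Dict.keys d0).foldl (fun d ch =>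
    if ch == plant then
      -- for key in dict[ch]:  (the iterator is taken over dict[ch] at loop entry)
      (PySem.Dict.keys (PySem.Dict.getD d ch PySem.Dict.empty)).foldl (fun d key =>
        -- new_list = dict[ch][key]   (KeyError excluded by Pre_update)
        let new_list := PySem.Dict.getD (PySem.Dict.getD d ch PySem.Dict.empty) key []
        -- dict[ch] = {}
        let d := PySem.Dict.insert d ch PySem.Dict.empty
        -- dict[ch][rarity] = new_list
        PySem.Dict.insert d ch (PySem.Dict.insert (PySem.Dict.getD d ch PySem.Dict.empty) rarity new_list)) d
    else d) d0
  (PySem.Dict.items d).map (fun p => (p.1, PySem.Dict.items p.2))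

-- ===== PORT B =====
def update_alt (dict : List (String × List (String × List Int))) (plant : String) (rarity : String) : List (String × List (String × List Int)) :=
  -- if plant in dict: inner = dict[plant]
  match PySem.Dict.get? (PySem.Dict.mk dict) plant with
  | none => dict
  | some inner =>
    match inner with
    | [] => dict
    | (_k0, v0) :: _ =>
      -- dict[plant] = {rarity: first_value}
      PySem.Dict.items (PySem.Dict.insert (PySem.Dict.mk dict) plant [(rarity, v0)])

-- ===== PRECONDITION & SPEC =====
-- Pre_ excludes (a) association lists with duplicate outer or inner keys, which do not represent any
-- Python dict (the duplicates collapse before A ever runs), and (b) the inputs on which A raises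
-- KeyError: a plant entry whose inner dict has a key after the first that differs from rarity.
def Pre_update (dict : List (String × List (String × List Int))) (plant : String) (rarity : String) : Prop :=
  (dict.map Prod.fst).Nodup ∧
  ∀ p ∈ dict, (p.2.map Prod.fst).Nodup ∧ (p.1 = plant → ∀ q ∈ p.2.tail, q.1 = rarity)
instance (dict : List (String × List (String × List Int))) (plant : String) (rarity : String) : Decidable (Pre_update dict plant rarity) := by unfold Pre_update; infer_instance
def pvWitness_update : (List (String × List (String × List Int))) × String × String :=
  ([("lily", [("rare", [2, 7])]), ("rose", [])], "lily", "epic")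
def Spec_update (dict : List (String × List (String × List Int))) (plant : String) (rarity : String) (out : List (String × List (String × List Int))) : Prop := out = update_alt dict plant rarity
instance (dict : List (String × List (String × List Int))) (plant : String) (rarity : String) (out : List (String × List (String × List Int))) : Decidable (Spec_update dict plant rarity out) := by unfold Spec_update; infer_instance

-- ===== CLAIM (what is proved, stated in full; the proofs are below) =====
def Claim_equal_update : Prop := ∀ (dict : List (String × List (String × List Int))) (plant : String) (rarity : String), Dom_update dict plant rarity → Pre_update dict plant rarity → Spec_update dict plant rarity (update dict plant rarity)

-- ===== LEMMAS AND PROOFS =====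

-- get? through the mk ∘ map-on-values wrapper
theorem get?_mk_map {α β : Type} (l : List (String × α)) (f : α → β) (k : String) :
    PySem.Dict.get? (PySem.Dict.mk (l.map (fun p => (p.1, f p.2)))) k
      = (PySem.Dict.get? (PySem.Dict.mk l) k).map f := by
  induction l with
  | nil => rfl
  | cons p t ih =>
    obtain ⟨pk, pv⟩ := p
    simp only [List.map_cons, PySem.Dict.get?_mk_cons]
    by_cases h : pk == k
    · simp [h]
    · simp [h, ih]

-- a fold whose step fires only at `plant` over a Nodup key list is one application of the step
theorem foldl_step_at_plant {σ : Type} (plant : String) (g : σ → String → σ)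
    (ks : List String) (d : σ) (hnd : ks.Nodup) :
    ks.foldl (fun d ch => if ch == plant then g d ch else d) d
      = if plant ∈ ks then g d plant else d := by
  induction ks generalizing d with
  | nil => simp
  | cons x t ih =>
    rcases List.nodup_cons.mp hnd with ⟨hx, ht⟩
    by_cases hxp : x = plant
    · subst hxp
      simp only [List.foldl_cons, BEq.rfl, if_pos, List.mem_cons, true_or]
      have h1 : t.foldl (fun d ch => if ch == x then g d ch else d) (g d x)
          = t.foldl (fun d _ => d) (g d x) :=
        PySem.List.foldl_congr_mem t _ _ _ (by
          intro acc y hy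
          have hne : y ≠ x := fun h => hx (h ▸ hy)
          simp [hne])
      rw [h1, PySem.List.foldl_ignore]
    · have hbeq : (x == plant) = false := by simp [hxp]
      simp only [List.foldl_cons, hbeq, Bool.false_eq_true, if_false, List.mem_cons]
      rw [ih d ht]
      have : (plant = x) = False := by simp [Ne.symm hxp]
      simp [this]

-- stripping the nested-Dict wrapper commutes with an insert at `plant`
theorem items_insert_map (dict : List (String × List (String × List Int))) (plant : String)
    (x : List (String × List Int)) :
    (((PySem.Dict.mk (dict.map (fun p => (p.1, PySem.Dict.mk p.2)))).insert plant (PySem.Dict.mk x)).items).map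
        (fun p => (p.1, PySem.Dict.items p.2))
      = ((PySem.Dict.mk dict).insert plant x).items := by
  rw [PySem.Dict.items_insert, PySem.Dict.items_insert,
      PySem.Dict.contains_eq_decide_mem_keys, PySem.Dict.contains_eq_decide_mem_keys]
  have hkeys : (PySem.Dict.mk (dict.map (fun p => (p.1, PySem.Dict.mk p.2)))).keys
      = (PySem.Dict.mk dict).keys := by
    simp [PySem.Dict.keys]
  rw [hkeys]
  by_cases h : plant ∈ (PySem.Dict.mk dict).keys
  · simp only [h, decide_true, if_true]
    show (List.map _ ((List.map _ dict).map _)) = _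
    rw [List.map_map, List.map_map]
    apply List.map_congr_left
    intro p _
    by_cases hp : p.1 = plant
    · simp [hp]
    · simp [hp]
  · simp only [h, decide_false]
    show (List.map _ ((List.map _ dict) ++ _)) = _
    rw [List.map_append, List.map_map]
    simp [Function.comp_def]

-- the inner two-key lists Pre_update admits
theorem tail_shape (tl : List (String × List Int)) (k0 rarity : String)
    (hnd : (k0 :: tl.map Prod.fst).Nodup) (htl : ∀ q ∈ tl, q.1 = rarity) :
    tl = [] ∨ ∃ w, tl = [(rarity, w)] := by
  match tl with
  | [] => exact Or.inl rfl
  | q :: rest =>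
    right
    have hq : q.1 = rarity := htl q (List.mem_cons_self)
    have hr : rest = [] := by
      match rest with
      | [] => rfl
      | r :: rs =>
        exfalso
        have h1 : r.1 = rarity := htl r (by simp)
        have hnd2 : ((q :: r :: rs).map Prod.fst).Nodup := (List.nodup_cons.mp hnd).2
        simp only [List.map_cons, List.nodup_cons] at hnd2
        exact hnd2.1 (by simp [hq, h1])
    subst hr
    exact ⟨q.2, by rw [← hq]⟩

theorem update_spec : Claim_equal_update := by
  intro dict plant rarity _hdom hpre
  obtain ⟨hnd, hinner⟩ := hpre
  unfold Spec_update update update_alt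
  simp only []
  have hkeys : (PySem.Dict.mk (dict.map (fun p => (p.1, PySem.Dict.mk p.2)))).keys
      = dict.map Prod.fst := by simp [PySem.Dict.keys]
  have hndk : (PySem.Dict.mk (dict.map (fun p => (p.1, PySem.Dict.mk p.2)))).keys.Nodup := by
    rw [hkeys]; exact hnd
  rw [foldl_step_at_plant (hnd := hndk)]
  rw [hkeys]
  by_cases hmem : plant ∈ dict.map Prod.fst
  · -- plant is a key of the dict
    obtain ⟨v, hv⟩ : ∃ v, PySem.Dict.get? (PySem.Dict.mk dict) plant = some v := by
      cases h : PySem.Dict.get? (PySem.Dict.mk dict) plant with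
      | none =>
        exact absurd ((PySem.Dict.get?_eq_none_iff_not_mem_keys _ _).mp h)
          (by simpa [PySem.Dict.keys] using hmem)
      | some v => exact ⟨v, rfl⟩
    have hpv : (plant, v) ∈ dict := by
      simpa using PySem.Dict.mem_items_of_get?_eq_some _ hv
    obtain ⟨hvnd, htail⟩ := hinner _ hpv
    have htail' : ∀ q ∈ v.tail, q.1 = rarity := htail rfl
    have hgetD0 : PySem.Dict.getD (PySem.Dict.mk (dict.map (fun p => (p.1, PySem.Dict.mk p.2))))
        plant PySem.Dict.empty = PySem.Dict.mk v := by
      rw [PySem.Dict.getD_eq_get?_getD, get?_mk_map, hv]; rfl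
    rw [if_pos hmem, hv, hgetD0]
    rcases v with _ | ⟨⟨k0, v0⟩, tl⟩
    · simp [Function.comp_def]
    · have hsh := tail_shape tl k0 rarity (by simpa using hvnd) (by simpa using htail')
      have hstep : ∀ (d1 : PySem.Dict String (PySem.Dict String (List Int))) (key : String),
          PySem.Dict.getD (PySem.Dict.getD d1 plant PySem.Dict.empty) key [] = v0 →
          PySem.Dict.insert (PySem.Dict.insert d1 plant PySem.Dict.empty) plant
              (PySem.Dict.insert (PySem.Dict.getD (PySem.Dict.insert d1 plant PySem.Dict.empty) plant PySem.Dict.empty) rarity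
                (PySem.Dict.getD (PySem.Dict.getD d1 plant PySem.Dict.empty) key []))
            = PySem.Dict.insert d1 plant (PySem.Dict.mk [(rarity, v0)]) := by
        intro d1 key hval
        rw [hval, PySem.Dict.getD_insert_self, PySem.Dict.insert_insert_self]
        rfl
      rcases hsh with htl | ⟨w, htl⟩ <;> subst htl
      · -- inner dict has the single key k0
        have hv0 : PySem.Dict.getD (PySem.Dict.getD
            (PySem.Dict.mk (dict.map (fun p => (p.1, PySem.Dict.mk p.2)))) plant PySem.Dict.empty) k0 [] = v0 := by
          rw [hgetD0, PySem.Dict.getD_eq_get?_getD, PySem.Dict.get?_mk_cons]; simp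
        simp only [PySem.Dict.keys_mk, List.map_cons, List.map_nil, List.foldl_cons,
          List.foldl_nil]
        rw [hstep _ k0 hv0]
        exact items_insert_map dict plant [(rarity, v0)]
      · -- inner dict has keys [k0, rarity]
        have hv0 : PySem.Dict.getD (PySem.Dict.getD
            (PySem.Dict.mk (dict.map (fun p => (p.1, PySem.Dict.mk p.2)))) plant PySem.Dict.empty) k0 [] = v0 := by
          rw [hgetD0, PySem.Dict.getD_eq_get?_getD, PySem.Dict.get?_mk_cons]; simp
        simp only [PySem.Dict.keys_mk, List.map_cons, List.map_nil, List.foldl_cons,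
          List.foldl_nil]
        rw [hstep _ k0 hv0]
        have hv1 : PySem.Dict.getD
            (PySem.Dict.getD (PySem.Dict.insert (PySem.Dict.mk (dict.map (fun p => (p.1, PySem.Dict.mk p.2))))
              plant (PySem.Dict.mk [(rarity, v0)])) plant PySem.Dict.empty) rarity [] = v0 := by
          rw [PySem.Dict.getD_insert_self, PySem.Dict.getD_eq_get?_getD, PySem.Dict.get?_mk_cons]
          simp
        rw [hstep _ rarity hv1, PySem.Dict.insert_insert_self]
        exact items_insert_map dict plant [(rarity, v0)]
  · -- plant is not a key: both sides return the input unchanged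
    have hnone : PySem.Dict.get? (PySem.Dict.mk dict) plant = none :=
      (PySem.Dict.get?_eq_none_iff_not_mem_keys _ _).mpr (by simpa [PySem.Dict.keys] using hmem)
    rw [if_neg hmem, hnone]
    simp [Function.comp_def]
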